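-- pv_equiv track=rewrite | github.com/RubenGMeijer/SolvingProjectEuler | Project Euler 61 Cyclical figurate numbers.py | genPolyNo
-- ===== SOURCE A (Python) =====
-- import math
--
-- def countDigits(n):
--     return int(math.log10(n))+1
--
-- def genPolyNo(s):
--     # generate 4-digit polygonal numbers given sides of polygon s
--     inc=s-2
--     n=0
--     c=0
--     sol=[]
--     while True:
--         c+=1+n*inc
--         n+=1
--         if countDigits(c) > 4:
--             return sol
--         if countDigits(c) > 3:
--             sol.append(c)
-- ===== SOURCE B (Python) =====
-- import math
--
-- def countDigits(n):
--     return int(math.log10(n))+1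
--
-- def genPolyNo(s):
--     # generate 4-digit polygonal numbers given sides of polygon s
--     # closed-form s-gonal value per index instead of a running accumulator
--     sol = []
--     n = 1
--     while True:
--         c = n * ((s - 2) * n - (s - 4)) // 2
--         d = countDigits(c)
--         if d > 4:
--             return sol
--         if d > 3:
--             sol.append(c)
--         n += 1
-- ===== Notes on version B (the rewrite author's own statement) =====
-- stated objective: alternative
-- what changed: B drops A's running accumulator (c += 1+n*inc) and instead computes each term directly from the loop index with the closed-form polygonal formula c = n*((s-2)*n-(s-4))//2.
-- outside the precondition, e.g. on genPolyNo(1): A raises ValueError, B raises ValueError; on genPolyNo(0): A raises ValueError, B raises ValueError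
import Mathlib
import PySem

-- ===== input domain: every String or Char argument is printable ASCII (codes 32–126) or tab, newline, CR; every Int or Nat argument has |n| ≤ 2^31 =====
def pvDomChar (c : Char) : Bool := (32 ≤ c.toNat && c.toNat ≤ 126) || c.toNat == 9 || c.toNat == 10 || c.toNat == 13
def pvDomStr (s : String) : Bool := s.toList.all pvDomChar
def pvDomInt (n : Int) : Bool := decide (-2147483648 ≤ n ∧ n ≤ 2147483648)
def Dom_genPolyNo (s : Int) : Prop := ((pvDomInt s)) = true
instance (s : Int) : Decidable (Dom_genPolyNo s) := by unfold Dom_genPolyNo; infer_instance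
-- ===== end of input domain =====

-- B replaces A's running accumulator `c += 1+n*inc` by the closed-form s-gonal value
-- c = n*((s-2)*n-(s-4))//2 recomputed from the loop index each iteration (alternative decomposition, same cost).

-- ===== PORT A =====
-- countDigits(n) = int(math.log10(n))+1; for the positive ints both programs feed it this is
-- exactly the number of decimal digits, which is the length of str(n). Exact on that domain.
def countDigits (n : Int) : Int := ((PySem.Int.toStr n).length : Int)

-- the `while True` loop of A; fuel bounds the iterations (c ≥ n, so 100001 steps always suffice
-- on Pre_; the equivalence proof does not depend on the bound since both ports share it).
def genPolyNoLoop (inc : Int) (n c : Int) (sol : List Int) (fuel : Nat) : List Int :=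
  match fuel with
  | 0 => sol
  | fuel + 1 =>
    let c' := c + (1 + n * inc)
    let n' := n + 1
    if countDigits c' > 4 then sol
    else if countDigits c' > 3 then genPolyNoLoop inc n' c' (sol ++ [c']) fuel
    else genPolyNoLoop inc n' c' sol fuel

def genPolyNo (s : Int) : List Int :=
  genPolyNoLoop (s - 2) 0 0 [] 100001

-- ===== PORT B =====
-- closed-form s-gonal number: n*((s-2)*n-(s-4))//2 (Python floor division)
def polyVal (s n : Int) : Int := PySem.Int.floordiv (n * ((s - 2) * n - (s - 4))) 2

def genPolyNoAltLoop (s : Int) (n : Int) (sol : List Int) (fuel : Nat) : List Int :=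
  match fuel with
  | 0 => sol
  | fuel + 1 =>
    let c := polyVal s n
    let d := countDigits c
    if d > 4 then sol
    else if d > 3 then genPolyNoAltLoop s (n + 1) (sol ++ [c]) fuel
    else genPolyNoAltLoop s (n + 1) sol fuel

def genPolyNo_alt (s : Int) : List Int :=
  genPolyNoAltLoop s 1 [] 100001

-- ===== PRECONDITION & SPEC =====
-- Pre_ excludes s ≤ 1, where the polygonal sequence hits a value ≤ 0 and Python's
-- math.log10 raises ValueError in both A and B.
def Pre_genPolyNo (s : Int) : Prop := 2 ≤ s
instance (s : Int) : Decidable (Pre_genPolyNo s) := by unfold Pre_genPolyNo; infer_instance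
def pvWitness_genPolyNo : Int := (5)

def Spec_genPolyNo (s : Int) (out : List Int) : Prop := out = genPolyNo_alt s
instance (s : Int) (out : List Int) : Decidable (Spec_genPolyNo s out) := by unfold Spec_genPolyNo; infer_instance

-- ===== CLAIM (what is proved, stated in full; the proofs are below) =====
def Claim_equal_genPolyNo : Prop := ∀ (s : Int), Dom_genPolyNo s → Pre_genPolyNo s → Spec_genPolyNo s (genPolyNo s)

-- ===== LEMMAS AND PROOFS =====

-- the closed form satisfies A's recurrence: next value = current + (1 + n*(s-2))
lemma polyVal_succ (s n : Int) :
    polyVal s (n + 1) = polyVal s n + (1 + n * (s - 2)) := by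
  unfold polyVal
  have h : (n + 1) * ((s - 2) * (n + 1) - (s - 4))
      = n * ((s - 2) * n - (s - 4)) + (1 + n * (s - 2)) * 2 := by ring
  rw [h]
  unfold PySem.Int.floordiv
  exact Int.add_mul_fdiv_right _ _ (by norm_num)

lemma polyVal_zero (s : Int) : polyVal s 0 = 0 := by
  unfold polyVal PySem.Int.floordiv
  simp

-- loop invariant: when A's accumulator c holds the n-th polygonal value, A's loop from
-- state (n, c) equals B's loop at index n+1, for any fuel.
lemma loop_eq (s : Int) : ∀ (fuel : Nat) (n c : Int) (sol : List Int),
    c = polyVal s n →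
    genPolyNoLoop (s - 2) n c sol fuel = genPolyNoAltLoop s (n + 1) sol fuel := by
  intro fuel
  induction fuel with
  | zero => intro n c sol _; rfl
  | succ fuel ih =>
    intro n c sol hc
    have hstep : c + (1 + n * (s - 2)) = polyVal s (n + 1) := by
      rw [hc, polyVal_succ]
    simp only [genPolyNoLoop, genPolyNoAltLoop, hstep]
    split_ifs with h1 h2
    · rfl
    · exact ih (n + 1) _ _ rfl
    · exact ih (n + 1) _ _ rfl

-- ===== VERDICT (by name: the statement is the Claim_ definition above) =====
theorem genPolyNo_spec : Claim_equal_genPolyNo := by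
  intro s _ _
  unfold Spec_genPolyNo genPolyNo genPolyNo_alt
  exact loop_eq s 100001 0 0 [] (polyVal_zero s).symm
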